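-- pv_equiv track=rewrite | github.com/asanso/ca | mca_fuzzer_root.py | best_agreement_exact
-- ===== SOURCE A (Python) =====
-- from itertools import combinations
-- from typing import List, Tuple, Optional
--
-- def poly_eval(coeffs: List[int], x: int, p: int) -> int:
--     y = 0
--     for c in reversed(coeffs):
--         y = (y * x + c) % p
--     return y
--
-- def eval_poly_vector(coeffs: List[int], xs: List[int], p: int) -> List[int]:
--     return [poly_eval(coeffs, x, p) for x in xs]
--
-- def poly_add(a, b, p):
--     m = max(len(a), len(b))
--     out = [0]*m
--     for i in range(m):
--         if i < len(a): out[i] = (out[i] + a[i]) % p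
--         if i < len(b): out[i] = (out[i] + b[i]) % p
--     return out
--
-- def poly_mul(a, b, p):
--     out = [0]*(len(a)+len(b)-1)
--     for i, ai in enumerate(a):
--         for j, bj in enumerate(b):
--             out[i+j] = (out[i+j] + ai*bj) % p
--     return out
--
-- def poly_scale(a, s, p):
--     return [(ai*s) % p for ai in a]
--
-- def interpolate_lagrange(xs, ys, k, p):
--     """
--     Coeffs of the unique degree<k polynomial over GF(p) interpolating k points.
--     Returned in power basis: c0 + c1 x + ... + c_{k-1} x^{k-1}.
--     """
--     coeffs = [0]*k
--     for i in range(k):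
--         xi, yi = xs[i] % p, ys[i] % p
--         num = [1]
--         denom = 1
--         for m in range(k):
--             if m == i: continue
--             num = poly_mul(num, [(-xs[m]) % p, 1], p)   # (x - x_m)
--             denom = (denom * ((xi - xs[m]) % p)) % p
--         inv_denom = pow(denom, p-2, p)
--         li = poly_scale(num, (yi*inv_denom) % p, p)     # yi * L_i(x)
--         coeffs = poly_add(coeffs, li, p)
--     coeffs = (coeffs + [0]*k)[:k]
--     return coeffs
--
-- def best_agreement_exact(y: List[int], xs: List[int], k: int, p: int) -> int:
--     n = len(xs)
--     best = -1
--     for T in combinations(range(n), k):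
--         xT = [xs[i] for i in T]; yT = [y[i] for i in T]
--         coeffs = interpolate_lagrange(xT, yT, k, p)
--         cw = eval_poly_vector(coeffs, xs, p)
--         agree = sum(int(cw[i] == y[i]) for i in range(n))
--         if agree > best:
--             best = agree
--             if best == n: break
--     return best
-- ===== SOURCE B (Python) =====
-- from itertools import combinations
-- from typing import List
--
--
-- def best_agreement_exact(y: List[int], xs: List[int], k: int, p: int) -> int:
--     n = len(xs)
--     best = -1
--     for T in combinations(range(n), k):
--         xT = [xs[i] for i in T]; yT = [y[i] for i in T]
--         # barycentric-style weights w[i] = yT[i] * inv(prod_{m!=i}(xT[i]-xT[m])) mod p;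
--         # no power-basis coefficient lists are ever built
--         w = []
--         for i in range(k):
--             d = 1
--             for m in range(k):
--                 if m != i:
--                     d = (d * ((xT[i] % p - xT[m]) % p)) % p
--             w.append((yT[i] % p) * pow(d, p - 2, p) % p)
--         agree = 0
--         for j in range(n):
--             v = 0
--             for i in range(k):
--                 t = w[i]
--                 for m in range(k):
--                     if m != i:
--                         t = (t * (xs[j] - xT[m])) % p
--                 v = (v + t) % p
--             if v == y[j]:
--                 agree += 1
--         if agree > best:
--             best = agree
--             if best == n:
--                 break
--     return best
-- ===== Notes on version B (the rewrite author's own statement) =====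
-- stated objective: alternative
-- what changed: B never builds power-basis polynomial coefficients: interpolate_lagrange, poly_mul, poly_add, poly_scale and the Horner evaluator are gone, replaced by per-subset barycentric weights (product-then-single-Fermat-inverse, exactly A's denominators) and direct product evaluation of each Lagrange term at each point.
-- outside the precondition, e.g. on best_agreement_exact([0, 1], [0, 1], 1, -5): A returns 1, B returns 1; on best_agreement_exact([0, 1], [0, 2], 2, -4): A raises ValueError, B raises ValueError
import Mathlib
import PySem

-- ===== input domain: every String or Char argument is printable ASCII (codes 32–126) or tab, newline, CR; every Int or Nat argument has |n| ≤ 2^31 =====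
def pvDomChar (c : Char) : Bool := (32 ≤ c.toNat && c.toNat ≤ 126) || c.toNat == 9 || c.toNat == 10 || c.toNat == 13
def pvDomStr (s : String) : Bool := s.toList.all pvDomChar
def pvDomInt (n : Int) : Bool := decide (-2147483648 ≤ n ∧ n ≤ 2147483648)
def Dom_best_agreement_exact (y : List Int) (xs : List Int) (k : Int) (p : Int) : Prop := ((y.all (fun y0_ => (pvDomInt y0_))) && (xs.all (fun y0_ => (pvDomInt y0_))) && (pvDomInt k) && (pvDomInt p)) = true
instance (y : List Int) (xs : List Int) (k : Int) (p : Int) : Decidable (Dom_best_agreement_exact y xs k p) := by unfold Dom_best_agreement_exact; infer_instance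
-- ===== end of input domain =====

-- B replaces A's power-basis Lagrange interpolation (poly_mul/poly_add/poly_scale + Horner
-- evaluation) by direct barycentric-style evaluation with per-subset weights: an
-- 'alternative' re-implementation, not claimed faster.

-- Shared helper: Python's three-argument pow(b, e, m) by binary exponentiation.
-- (PySem.Int.powMod computes b^e literally, infeasible for e near 2^31; this helper is
-- exact for m ≥ 1 and e ≥ 0.  Both Pythons call the identical built-in, so both ports
-- share it.  Under Pre_ the exponent p-2 is negative only for p = 1, where Python's
-- pow(d, -1, 1) = 0 agrees with the port's (p-2).toNat = 0 giving 1 % 1 = 0.)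
def powmodAux : Nat → Int → Nat → Int → Int
  | 0, _, _, m => PySem.Int.mod 1 m
  | fuel + 1, b, e, m =>
    if e = 0 then PySem.Int.mod 1 m
    else
      let hf := powmodAux fuel b (e / 2) m
      if e % 2 = 0 then PySem.Int.mod (hf * hf) m
      else PySem.Int.mod (PySem.Int.mod (hf * hf) m * b) m

def powmod (b : Int) (e : Nat) (m : Int) : Int := powmodAux (e + 1) b e m

-- ===== PORT A =====
-- All list indexing below is via List.getD _ _ 0: every index a loop produces is in range
-- on inputs admitted by Pre_ (combination members are < len xs ≤ len y; i, m < k = len xT).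
-- range(k) over a Python int k is ported as List.range k.toNat (empty for k < 0, as in Python).

def poly_eval (coeffs : List Int) (x : Int) (p : Int) : Int :=
  coeffs.reverse.foldl (fun yv c => PySem.Int.mod (yv * x + c) p) 0

def eval_poly_vector (coeffs : List Int) (xs : List Int) (p : Int) : List Int :=
  xs.map (fun x => poly_eval coeffs x p)

def poly_add (a b : List Int) (p : Int) : List Int :=
  (List.range (max a.length b.length)).map (fun i =>
    let o1 : Int := if i < a.length then PySem.Int.mod (0 + a.getD i 0) p else 0
    if i < b.length then PySem.Int.mod (o1 + b.getD i 0) p else o1)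

def poly_mul (a b : List Int) (p : Int) : List Int :=
  -- zipIdx pairs are (value, index), matching 'for i, ai in enumerate(a)'
  a.zipIdx.foldl (fun out (q : Int × Nat) =>
    b.zipIdx.foldl (fun out (r : Int × Nat) =>
      out.set (q.2 + r.2) (PySem.Int.mod (out.getD (q.2 + r.2) 0 + q.1 * r.1) p)) out)
    (List.replicate (a.length + b.length - 1) 0)

def poly_scale (a : List Int) (s : Int) (p : Int) : List Int :=
  a.map (fun ai => PySem.Int.mod (ai * s) p)

-- the body of interpolate_lagrange's outer 'for i in range(k)' loop
def interpStep (xs ys : List Int) (kN : Nat) (p : Int) (coeffs : List Int) (i : Nat) : List Int :=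
  let xi := PySem.Int.mod (xs.getD i 0) p
  let yi := PySem.Int.mod (ys.getD i 0) p
  let nd := (List.range kN).foldl (fun (nd : List Int × Int) m =>
    if m = i then nd
    else (poly_mul nd.1 [PySem.Int.mod (-(xs.getD m 0)) p, 1] p,
          PySem.Int.mod (nd.2 * PySem.Int.mod (xi - xs.getD m 0) p) p)) ([1], 1)
  let inv_denom := powmod nd.2 (p - 2).toNat p
  let li := poly_scale nd.1 (PySem.Int.mod (yi * inv_denom) p) p
  poly_add coeffs li p

def interpolate_lagrange (xs ys : List Int) (k : Int) (p : Int) : List Int :=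
  let kN := k.toNat
  let coeffs := (List.range kN).foldl (interpStep xs ys kN p) (List.replicate kN 0)
  (coeffs ++ List.replicate kN 0).take kN     -- (coeffs + [0]*k)[:k], k ≥ 0 under Pre_

def baeLoopA (y xs : List Int) (k p : Int) : List (List Nat) → Int → Int
  | [], best => best
  | T :: Ts, best =>
    let xT := T.map (fun i => xs.getD i 0)
    let yT := T.map (fun i => y.getD i 0)
    let coeffs := interpolate_lagrange xT yT k p
    let cw := eval_poly_vector coeffs xs p
    let agree := ((List.range xs.length).map
      (fun i => if cw.getD i 0 = y.getD i 0 then (1 : Int) else 0)).sum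
    if agree > best then
      if agree = (xs.length : Int) then agree else baeLoopA y xs k p Ts agree
    else baeLoopA y xs k p Ts best

def best_agreement_exact (y : List Int) (xs : List Int) (k : Int) (p : Int) : Int :=
  baeLoopA y xs k p (PySem.List.combinations (List.range xs.length) k.toNat) (-1)

-- ===== PORT B =====

def baryWeights (xT yT : List Int) (k p : Int) : List Int :=
  (List.range k.toNat).foldl (fun w i =>
    let d := (List.range k.toNat).foldl (fun d m =>
      if m ≠ i then
        PySem.Int.mod (d * PySem.Int.mod (PySem.Int.mod (xT.getD i 0) p - xT.getD m 0) p) p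
      else d) 1
    w ++ [PySem.Int.mod (PySem.Int.mod (yT.getD i 0) p * powmod d (p - 2).toNat p) p]) []

def baryEval (w xT : List Int) (x : Int) (k p : Int) : Int :=
  (List.range k.toNat).foldl (fun v i =>
    let t := (List.range k.toNat).foldl (fun t m =>
      if m ≠ i then PySem.Int.mod (t * (x - xT.getD m 0)) p else t) (w.getD i 0)
    PySem.Int.mod (v + t) p) 0

def baeLoopB (y xs : List Int) (k p : Int) : List (List Nat) → Int → Int
  | [], best => best
  | T :: Ts, best =>
    let xT := T.map (fun i => xs.getD i 0)
    let yT := T.map (fun i => y.getD i 0)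
    let w := baryWeights xT yT k p
    let agree := (List.range xs.length).foldl (fun agree j =>
      if baryEval w xT (xs.getD j 0) k p = y.getD j 0 then agree + 1 else agree) (0 : Int)
    if agree > best then
      if agree = (xs.length : Int) then agree else baeLoopB y xs k p Ts agree
    else baeLoopB y xs k p Ts best

def best_agreement_exact_alt (y : List Int) (xs : List Int) (k : Int) (p : Int) : Int :=
  baeLoopB y xs k p (PySem.List.combinations (List.range xs.length) k.toNat) (-1)

-- ===== PRECONDITION & SPEC =====
-- Pre_ excludes the inputs where A raises — negative k (ValueError from combinations),
-- y shorter than xs while some subset gets evaluated (IndexError), and p = 0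
-- (ZeroDivisionError) — and all other p ≤ 0: for p < 0 the Fermat pow(d, p-2, p) has a
-- negative exponent and raises ValueError whenever some denominator is not invertible;
-- the occasional negative p on which A does return a value is excluded with it (see cites).
def Pre_best_agreement_exact (y : List Int) (xs : List Int) (k : Int) (p : Int) : Prop :=
  0 ≤ k ∧ ((k ≤ (xs.length : Int) ∧ 1 ≤ xs.length) → (xs.length ≤ y.length ∧ 1 ≤ p))

instance (y : List Int) (xs : List Int) (k : Int) (p : Int) :
    Decidable (Pre_best_agreement_exact y xs k p) := by
  unfold Pre_best_agreement_exact; infer_instance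

def pvWitness_best_agreement_exact : List Int × List Int × Int × Int :=
  ([1, 2, 0], [0, 1, 2], 2, 5)

def Spec_best_agreement_exact (y : List Int) (xs : List Int) (k : Int) (p : Int) (out : Int) : Prop :=
  out = best_agreement_exact_alt y xs k p

instance (y : List Int) (xs : List Int) (k : Int) (p : Int) (out : Int) :
    Decidable (Spec_best_agreement_exact y xs k p out) := by
  unfold Spec_best_agreement_exact; infer_instance

-- ===== CLAIM (what is proved, stated in full; the proofs are below) =====
def Claim_equal_best_agreement_exact : Prop := ∀ (y : List Int) (xs : List Int) (k : Int) (p : Int), Dom_best_agreement_exact y xs k p → Pre_best_agreement_exact y xs k p → Spec_best_agreement_exact y xs k p (best_agreement_exact y xs k p)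

-- ===== LEMMAS AND PROOFS =====

-- exact (unreduced) Horner evaluation of a coefficient list
def evalZ (c : List Int) (x : Int) : Int := c.foldr (fun cc acc => acc * x + cc) 0

-- product of (x - xT[m]) over m ∈ l with m ≠ i
def prodSkip (xT : List Int) (i : Nat) (x : Int) (l : List Nat) : Int :=
  ((l.filter (fun m => m ≠ i)).map (fun m => x - xT.getD m 0)).prod

-- the weight integer both ports compute for Lagrange index i
def wFun (xT yT : List Int) (kN : Nat) (p : Int) (i : Nat) : Int :=
  let d := (List.range kN).foldl (fun d m =>
    if m ≠ i then
      PySem.Int.mod (d * PySem.Int.mod (PySem.Int.mod (xT.getD i 0) p - xT.getD m 0) p) p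
    else d) 1
  PySem.Int.mod (PySem.Int.mod (yT.getD i 0) p * powmod d (p - 2).toNat p) p

-- the common per-subset summand: weight i times its skip product over range kN
def wp (xT yT : List Int) (kN : Nat) (p x : Int) (i : Nat) : Int :=
  wFun xT yT kN p i * prodSkip xT i x (List.range kN)

theorem modmod (a p : Int) : a % p % p = a % p := Int.emod_emod_of_dvd a dvd_rfl

theorem congAdd {p a b : Int} (c : Int) (h : a % p = b % p) : (a + c) % p = (b + c) % p := by
  rw [Int.add_emod, h, ← Int.add_emod]

theorem congAddR {p a b : Int} (c : Int) (h : a % p = b % p) : (c + a) % p = (c + b) % p := by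
  rw [Int.add_emod, h, ← Int.add_emod]

theorem congMul {p a b : Int} (c : Int) (h : a % p = b % p) : (a * c) % p = (b * c) % p := by
  rw [Int.mul_emod, h, ← Int.mul_emod]

theorem evalZ_nil (x : Int) : evalZ [] x = 0 := rfl

theorem evalZ_cons (c : Int) (l : List Int) (x : Int) : evalZ (c :: l) x = evalZ l x * x + c := rfl

theorem evalZ_replicate_zero (n : Nat) (x : Int) : evalZ (List.replicate n 0) x = 0 := by
  induction n with
  | zero => rfl
  | succ n ih => simp [List.replicate_succ, evalZ_cons, ih]

theorem poly_eval_eq (c : List Int) (x p : Int) (hp : 0 < p) :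
    poly_eval c x p = evalZ c x % p := by
  unfold poly_eval
  rw [List.foldl_reverse]
  induction c with
  | nil => simp [evalZ_nil]
  | cons a l ih =>
    simp only [List.foldr_cons, evalZ_cons, PySem.Int.mod_eq_emod_of_pos hp] at ih ⊢
    rw [ih]
    exact congAdd a (by rw [congMul x (modmod (evalZ l x) p)])

theorem evalZ_set (l : List Int) (n : Nat) (v x : Int) (h : n < l.length) :
    evalZ (l.set n v) x = evalZ l x + (v - l.getD n 0) * x ^ n := by
  induction l generalizing n with
  | nil => simp at h
  | cons a t ih =>
    cases n with
    | zero => simp [evalZ_cons, List.getD]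
    | succ n =>
      simp only [List.set_cons_succ, evalZ_cons, List.getD_cons_succ]
      rw [ih n (by simpa using h)]
      ring

-- poly_scale
theorem length_poly_scale (a : List Int) (s p : Int) : (poly_scale a s p).length = a.length := by
  simp [poly_scale]

theorem evalZ_poly_scale (a : List Int) (s p x : Int) (hp : 0 < p) :
    evalZ (poly_scale a s p) x % p = (evalZ a x * s) % p := by
  induction a with
  | nil => simp [poly_scale, evalZ_nil]
  | cons c l ih =>
    simp only [poly_scale, List.map_cons, evalZ_cons, PySem.Int.mod_eq_emod_of_pos hp] at ih ⊢
    rw [show (evalZ l x * x + c) * s = evalZ l x * s * x + c * s from by ring]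
    exact (congAddR _ (modmod (c * s) p)).trans (congAdd _ (congMul x ih))

-- poly_add on equal-length lists
theorem poly_add_eq_zipWith (a b : List Int) (p : Int) (h : a.length = b.length) :
    poly_add a b p =
      List.zipWith (fun u v => PySem.Int.mod (PySem.Int.mod (0 + u) p + v) p) a b := by
  apply List.ext_getElem
  · simp [poly_add, h]
  · intro i h1 h2
    have hb : i < b.length := by simp at h2; omega
    have ha : i < a.length := by omega
    simp [poly_add, ha, hb]

theorem length_poly_add (a b : List Int) (p : Int) (h : a.length = b.length) :
    (poly_add a b p).length = a.length := by
  simp [poly_add, h]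

theorem evalZ_poly_add (a b : List Int) (p x : Int) (hp : 0 < p) (h : a.length = b.length) :
    evalZ (poly_add a b p) x % p = (evalZ a x + evalZ b x) % p := by
  rw [poly_add_eq_zipWith a b p h]
  induction a generalizing b with
  | nil =>
    cases b with
    | nil => simp [evalZ_nil]
    | cons v bs => simp at h
  | cons u as ih =>
    cases b with
    | nil => simp at h
    | cons v bs =>
      simp only [List.zipWith_cons_cons, evalZ_cons, PySem.Int.mod_eq_emod_of_pos hp]
      have h' : as.length = bs.length := by simpa using h
      rw [show evalZ as x * x + u + (evalZ bs x * x + v)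
            = (evalZ as x + evalZ bs x) * x + (u + v) from by ring]
      have hterm : (((0 + u) % p + v) % p) % p = (u + v) % p := by
        rw [modmod, zero_add, Int.add_emod, modmod, ← Int.add_emod]
      have ih' := ih bs h'
      simp only [PySem.Int.mod_eq_emod_of_pos hp] at ih'
      exact (congAddR _ hterm).trans (congAdd _ (congMul x ih'))

-- poly_mul with a linear factor [c, 1]
theorem inner_two (c p : Int) (out : List Int) (ai : Int) (i : Nat) :
    (([c, 1] : List Int).zipIdx.foldl (fun out (r : Int × Nat) =>
        out.set (i + r.2) (PySem.Int.mod (out.getD (i + r.2) 0 + ai * r.1) p)) out)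
    = (out.set i (PySem.Int.mod (out.getD i 0 + ai * c) p)).set (i + 1)
        (PySem.Int.mod ((out.set i (PySem.Int.mod (out.getD i 0 + ai * c) p)).getD (i + 1) 0 + ai * 1) p) := by
  simp [List.zipIdx_cons, List.zipIdx_nil, List.foldl_cons, List.foldl_nil]

theorem mulfold (c x p : Int) (hp : 0 < p) (as : List Int) :
    ∀ (n : Nat) (out : List Int), n + as.length < out.length →
    ((as.zipIdx n).foldl (fun out (q : Int × Nat) =>
        ([c, 1] : List Int).zipIdx.foldl (fun out (r : Int × Nat) =>
          out.set (q.2 + r.2) (PySem.Int.mod (out.getD (q.2 + r.2) 0 + q.1 * r.1) p)) out) out).length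
      = out.length
    ∧ evalZ ((as.zipIdx n).foldl (fun out (q : Int × Nat) =>
        ([c, 1] : List Int).zipIdx.foldl (fun out (r : Int × Nat) =>
          out.set (q.2 + r.2) (PySem.Int.mod (out.getD (q.2 + r.2) 0 + q.1 * r.1) p)) out) out) x % p
      = (evalZ out x + evalZ as x * x ^ n * (c + x)) % p := by
  induction as with
  | nil =>
    intro n out _
    simp [List.zipIdx, evalZ_nil]
  | cons a t ih =>
    intro n out hlen
    have hz : (a :: t).zipIdx n = (a, n) :: t.zipIdx (n + 1) := rfl
    rw [hz, List.foldl_cons]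
    dsimp only
    have hi : n < out.length := by simp at hlen; omega
    have hi1 : n + 1 < out.length := by simp at hlen; omega
    set out1 := out.set n (PySem.Int.mod (out.getD n 0 + a * c) p) with hout1
    set out2 := out1.set (n + 1) (PySem.Int.mod (out1.getD (n + 1) 0 + a * 1) p) with hout2
    have hstep : (([c, 1] : List Int).zipIdx.foldl (fun out (r : Int × Nat) =>
          out.set (n + r.2) (PySem.Int.mod (out.getD (n + r.2) 0 + a * r.1) p)) out) = out2 := by
      rw [inner_two c p out a n]
    have hlen1 : out1.length = out.length := by simp [hout1]
    have hlen2 : out2.length = out.length := by simp [hout2, hlen1]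
    have hrec := ih (n + 1) out2 (by simp at hlen ⊢; omega)
    constructor
    · rw [hstep]
      rw [hrec.1, hlen2]
    · rw [hstep, hrec.2]
      -- evalZ out2 ≡ evalZ out + a*c*x^n + a*x^(n+1)
      have e1 : evalZ out1 x = evalZ out x
          + (PySem.Int.mod (out.getD n 0 + a * c) p - out.getD n 0) * x ^ n :=
        evalZ_set out n _ x hi
      have e2 : evalZ out2 x = evalZ out1 x
          + (PySem.Int.mod (out1.getD (n + 1) 0 + a * 1) p - out1.getD (n + 1) 0) * x ^ (n + 1) :=
        evalZ_set out1 (n + 1) _ x (by omega)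
      have key : evalZ out2 x % p = (evalZ out x + a * c * x ^ n + a * x ^ (n + 1)) % p := by
        rw [e2, e1]
        simp only [PySem.Int.mod_eq_emod_of_pos hp]
        set g0 := out.getD n 0
        set g1 := out1.getD (n + 1) 0
        rw [show evalZ out x + ((g0 + a * c) % p - g0) * x ^ n + ((g1 + a * 1) % p - g1) * x ^ (n + 1)
              = ((g1 + a * 1) % p - g1) * x ^ (n + 1)
                + (((g0 + a * c) % p - g0) * x ^ n + evalZ out x) from by ring]
        rw [show evalZ out x + a * c * x ^ n + a * x ^ (n + 1)
              = a * x ^ (n + 1) + (a * c * x ^ n + evalZ out x) from by ring]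
        refine congAdd _ ?_ |>.trans (congAddR _ (congAdd _ ?_))
        · refine congMul (x ^ (n + 1)) ?_
          rw [Int.sub_emod, modmod, ← Int.sub_emod]
          simp
        · refine congMul (x ^ n) ?_
          rw [Int.sub_emod, modmod, ← Int.sub_emod]
          simp
      calc (evalZ out2 x + evalZ t x * x ^ (n + 1) * (c + x)) % p
          = (evalZ out x + a * c * x ^ n + a * x ^ (n + 1) + evalZ t x * x ^ (n + 1) * (c + x)) % p :=
            congAdd _ key
        _ = (evalZ out x + evalZ (a :: t) x * x ^ n * (c + x)) % p := by
            rw [evalZ_cons]; ring_nf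

theorem length_poly_mul_lin (a : List Int) (c p : Int) (hp : 0 < p) :
    (poly_mul a [c, 1] p).length = a.length + 1 := by
  unfold poly_mul
  have h := (mulfold c 0 p hp a 0
    (List.replicate (a.length + ([c, 1] : List Int).length - 1) 0)
    (by simp only [List.length_replicate, List.length_cons, List.length_nil]; omega)).1
  rw [h]
  simp only [List.length_replicate, List.length_cons, List.length_nil]
  omega

theorem evalZ_poly_mul_lin (a : List Int) (c x p : Int) (hp : 0 < p) :
    evalZ (poly_mul a [c, 1] p) x % p = (evalZ a x * (c + x)) % p := by
  unfold poly_mul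
  have h := (mulfold c x p hp a 0
    (List.replicate (a.length + ([c, 1] : List Int).length - 1) 0)
    (by simp only [List.length_replicate, List.length_cons, List.length_nil]; omega)).2
  rw [h, evalZ_replicate_zero]
  ring_nf

theorem prodSkip_nil (xT : List Int) (i : Nat) (x : Int) : prodSkip xT i x [] = 1 := rfl

theorem prodSkip_cons_eq (xT : List Int) (i : Nat) (x : Int) (m : Nat) (t : List Nat)
    (h : m = i) : prodSkip xT i x (m :: t) = prodSkip xT i x t := by
  simp [prodSkip, h]

theorem prodSkip_cons_ne (xT : List Int) (i : Nat) (x : Int) (m : Nat) (t : List Nat)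
    (h : m ≠ i) : prodSkip xT i x (m :: t) = (x - xT.getD m 0) * prodSkip xT i x t := by
  simp [prodSkip, h]

theorem length_filter_ne_range (i kN : Nat) (h : i < kN) :
    ((List.range kN).filter (fun m => m ≠ i)).length = kN - 1 := by
  induction kN with
  | zero => omega
  | succ n ih =>
    rw [List.range_succ, List.filter_append, List.length_append]
    by_cases hi : i = n
    · subst hi
      have h1 : (List.range i).filter (fun m => m ≠ i) = List.range i := by
        apply List.filter_eq_self.mpr
        intro m hm
        simp only [List.mem_range] at hm
        simp; omega
      rw [h1]; simp
    · have hi' : i < n := by omega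
      rw [ih hi']
      have h2 : ([n].filter (fun m => m ≠ i)) = [n] := by simp; omega
      rw [h2]; simp; omega

-- first component of the num/denom pair fold depends only on num
theorem numdenom_fst (xT : List Int) (p xi : Int) (i : Nat) (l : List Nat) :
    ∀ (s : List Int × Int),
    (l.foldl (fun (nd : List Int × Int) m =>
      if m = i then nd
      else (poly_mul nd.1 [PySem.Int.mod (-(xT.getD m 0)) p, 1] p,
            PySem.Int.mod (nd.2 * PySem.Int.mod (xi - xT.getD m 0) p) p)) s).1
    = l.foldl (fun a m =>
        if m = i then a else poly_mul a [PySem.Int.mod (-(xT.getD m 0)) p, 1] p) s.1 := by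
  induction l with
  | nil => intro s; rfl
  | cons m t ih =>
    intro s
    by_cases h : m = i
    · simp only [List.foldl_cons, if_pos h]; exact ih s
    · simp only [List.foldl_cons, if_neg h]; exact ih _

theorem numdenom_snd (xT : List Int) (p xi : Int) (i : Nat) (l : List Nat) :
    ∀ (s : List Int × Int),
    (l.foldl (fun (nd : List Int × Int) m =>
      if m = i then nd
      else (poly_mul nd.1 [PySem.Int.mod (-(xT.getD m 0)) p, 1] p,
            PySem.Int.mod (nd.2 * PySem.Int.mod (xi - xT.getD m 0) p) p)) s).2
    = l.foldl (fun d m =>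
        if m = i then d else PySem.Int.mod (d * PySem.Int.mod (xi - xT.getD m 0) p) p) s.2 := by
  induction l with
  | nil => intro s; rfl
  | cons m t ih =>
    intro s
    by_cases h : m = i
    · simp only [List.foldl_cons, if_pos h]; exact ih s
    · simp only [List.foldl_cons, if_neg h]; exact ih _

-- A tests 'if m == i: continue', B tests 'if m != i:'
theorem dfold_shape (xT : List Int) (p xi : Int) (i : Nat) (l : List Nat) :
    ∀ d, l.foldl (fun d m =>
        if m = i then d else PySem.Int.mod (d * PySem.Int.mod (xi - xT.getD m 0) p) p) d
      = l.foldl (fun d m =>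
        if m ≠ i then PySem.Int.mod (d * PySem.Int.mod (xi - xT.getD m 0) p) p else d) d := by
  induction l with
  | nil => intro d; rfl
  | cons m t ih =>
    intro d
    by_cases h : m = i
    · rw [List.foldl_cons, List.foldl_cons, if_pos h, if_neg (by simp [h])]
      exact ih d
    · rw [List.foldl_cons, List.foldl_cons, if_neg h, if_pos h]
      exact ih _

theorem numfold (xT : List Int) (p x : Int) (hp : 0 < p) (i : Nat) (l : List Nat) :
    ∀ (num : List Int) (E : Int), evalZ num x % p = E % p →
    ((l.foldl (fun a m =>
        if m = i then a else poly_mul a [PySem.Int.mod (-(xT.getD m 0)) p, 1] p) num).length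
      = num.length + (l.filter (fun m => m ≠ i)).length
    ∧ evalZ (l.foldl (fun a m =>
        if m = i then a else poly_mul a [PySem.Int.mod (-(xT.getD m 0)) p, 1] p) num) x % p
      = (E * prodSkip xT i x l) % p) := by
  induction l with
  | nil =>
    intro num E hE
    refine ⟨by simp, ?_⟩
    rw [prodSkip_nil, mul_one]
    exact hE
  | cons m t ih =>
    intro num E hE
    by_cases h : m = i
    · simp only [List.foldl_cons, if_pos h]
      have hrec := ih num E hE
      refine ⟨?_, ?_⟩
      · rw [hrec.1]; congr 1; simp [h]
      · rw [hrec.2, prodSkip_cons_eq xT i x m t h]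
    · simp only [List.foldl_cons, if_neg h]
      have hc : (PySem.Int.mod (-(xT.getD m 0)) p + x) % p = (x - xT.getD m 0) % p := by
        rw [PySem.Int.mod_eq_emod_of_pos hp, Int.add_emod, modmod, ← Int.add_emod]
        ring_nf
      have hnum' : evalZ (poly_mul num [PySem.Int.mod (-(xT.getD m 0)) p, 1] p) x % p
          = (E * (x - xT.getD m 0)) % p := by
        rw [evalZ_poly_mul_lin num _ x p hp, Int.mul_emod, hE, hc, ← Int.mul_emod]
      have hrec := ih _ (E * (x - xT.getD m 0)) hnum'
      refine ⟨?_, ?_⟩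
      · rw [hrec.1, length_poly_mul_lin num _ p hp]
        have : ((m :: t).filter (fun m => m ≠ i)).length
            = (t.filter (fun m => m ≠ i)).length + 1 := by simp [h]
        rw [this]; omega
      · rw [hrec.2, prodSkip_cons_ne xT i x m t h]
        congr 1; ring

theorem interpStep_eq (xT yT : List Int) (kN : Nat) (p : Int) (coeffs : List Int) (i : Nat) :
    interpStep xT yT kN p coeffs i
    = poly_add coeffs (poly_scale
        ((List.range kN).foldl (fun a m =>
          if m = i then a else poly_mul a [PySem.Int.mod (-(xT.getD m 0)) p, 1] p) [1])
        (wFun xT yT kN p i) p) p := by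
  simp only [interpStep, wFun]
  rw [numdenom_fst, numdenom_snd, dfold_shape]

theorem interpfold (xT yT : List Int) (p x : Int) (hp : 0 < p) (kN : Nat) (l : List Nat) :
    ∀ (coeffs : List Int) (S : Int), coeffs.length = kN → (∀ i ∈ l, i < kN) →
    evalZ coeffs x % p = S % p →
    ((l.foldl (interpStep xT yT kN p) coeffs).length = kN
    ∧ evalZ (l.foldl (interpStep xT yT kN p) coeffs) x % p
      = (S + (l.map (wp xT yT kN p x)).sum) % p) := by
  induction l with
  | nil =>
    intro coeffs S hlen _ hS
    refine ⟨hlen, ?_⟩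
    simpa using hS
  | cons i t ihl =>
    intro coeffs S hlen hmem hS
    have hik : i < kN := hmem i (by simp)
    have hkpos : 1 ≤ kN := by omega
    -- the num list after the inner loop
    have hnum := numfold xT p x hp i (List.range kN) [1] 1
      (by simp [evalZ_cons, evalZ_nil])
    have hnumlen : ((List.range kN).foldl (fun a m =>
        if m = i then a else poly_mul a [PySem.Int.mod (-(xT.getD m 0)) p, 1] p) [1]).length
        = kN := by
      rw [hnum.1, length_filter_ne_range i kN hik]
      simp; omega
    set num := (List.range kN).foldl (fun a m =>
        if m = i then a else poly_mul a [PySem.Int.mod (-(xT.getD m 0)) p, 1] p) [1] with hnumdef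
    set W := wFun xT yT kN p i with hWdef
    have hlilen : (poly_scale num W p).length = kN := by
      rw [length_poly_scale]; exact hnumlen
    have hli : evalZ (poly_scale num W p) x % p
        = (W * prodSkip xT i x (List.range kN)) % p := by
      rw [evalZ_poly_scale num W p x hp, Int.mul_emod, hnum.2, one_mul, ← Int.mul_emod,
        mul_comm]
    have hstep : interpStep xT yT kN p coeffs i = poly_add coeffs (poly_scale num W p) p :=
      interpStep_eq xT yT kN p coeffs i
    have hsteplen : (poly_add coeffs (poly_scale num W p) p).length = kN := by
      rw [length_poly_add _ _ _ (by rw [hlen, hlilen]), hlen]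
    have hstepval : evalZ (poly_add coeffs (poly_scale num W p) p) x % p
        = (S + wp xT yT kN p x i) % p := by
      rw [evalZ_poly_add _ _ _ _ hp (by rw [hlen, hlilen]), Int.add_emod, hS, hli,
        ← Int.add_emod]
      rfl
    have hrec := ihl (poly_add coeffs (poly_scale num W p) p) (S + wp xT yT kN p x i)
      hsteplen (fun j hj => hmem j (by simp [hj])) hstepval
    refine ⟨?_, ?_⟩
    · rw [List.foldl_cons, hstep]; exact hrec.1
    · rw [List.foldl_cons, hstep, hrec.2]
      simp only [List.map_cons, List.sum_cons]
      congr 1; ring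

theorem interp_eval (xT yT : List Int) (k p x : Int) (hp : 0 < p) :
    poly_eval (interpolate_lagrange xT yT k p) x p
      = (((List.range k.toNat).map (wp xT yT k.toNat p x)).sum) % p := by
  have h := interpfold xT yT p x hp k.toNat (List.range k.toNat)
    (List.replicate k.toNat 0) 0 (by simp) (by simp) (by simp [evalZ_replicate_zero])
  simp only [interpolate_lagrange]
  rw [List.take_left' h.1, poly_eval_eq _ x p hp, h.2]
  simp

-- ===== B side =====

theorem baryWeights_eq (xT yT : List Int) (k p : Int) :
    baryWeights xT yT k p = (List.range k.toNat).map (wFun xT yT k.toNat p) := by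
  simp only [baryWeights]
  rw [PySem.List.foldl_append_singleton_eq_map (fun i =>
    PySem.Int.mod (PySem.Int.mod (yT.getD i 0) p *
      powmod ((List.range k.toNat).foldl (fun d m =>
        if m ≠ i then
          PySem.Int.mod (d * PySem.Int.mod (PySem.Int.mod (xT.getD i 0) p - xT.getD m 0) p) p
        else d) 1) (p - 2).toNat p) p)]
  rw [List.nil_append]
  apply List.map_congr_left
  intro a _
  rfl

theorem tfold (xT : List Int) (p x : Int) (hp : 0 < p) (i : Nat) (l : List Nat) :
    ∀ t0 : Int, (l.foldl (fun t m =>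
        if m ≠ i then PySem.Int.mod (t * (x - xT.getD m 0)) p else t) t0) % p
      = (t0 * prodSkip xT i x l) % p := by
  induction l with
  | nil => intro t0; rw [List.foldl_nil, prodSkip_nil, mul_one]
  | cons m t ih =>
    intro t0
    by_cases h : m = i
    · simp only [List.foldl_cons, h, ne_eq, not_true_eq_false, if_false,
        prodSkip_cons_eq xT i x i t rfl]
      exact ih t0
    · simp only [List.foldl_cons, ne_eq, h, not_false_eq_true, if_true]
      rw [ih _, PySem.Int.mod_eq_emod_of_pos hp, Int.mul_emod, modmod, ← Int.mul_emod,
        prodSkip_cons_ne xT i x m t h]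
      congr 1; ring

theorem vfold (xT yT w : List Int) (p x : Int) (hp : 0 < p) (kN : Nat)
    (hw : ∀ i, i < kN → w.getD i 0 = wFun xT yT kN p i) (l : List Nat) :
    ∀ (v S : Int), v = S % p → (∀ i ∈ l, i < kN) →
    l.foldl (fun v i =>
      PySem.Int.mod (v + (List.range kN).foldl (fun t m =>
        if m ≠ i then PySem.Int.mod (t * (x - xT.getD m 0)) p else t) (w.getD i 0)) p) v
    = (S + (l.map (wp xT yT kN p x)).sum) % p := by
  induction l with
  | nil =>
    intro v S hv _
    simpa using hv
  | cons i t ihl =>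
    intro v S hv hmem
    have hik : i < kN := hmem i (by simp)
    rw [List.foldl_cons]
    set T := (List.range kN).foldl (fun t m =>
        if m ≠ i then PySem.Int.mod (t * (x - xT.getD m 0)) p else t) (w.getD i 0) with hT
    have hTmod : T % p = wp xT yT kN p x i % p := by
      rw [hT, tfold xT p x hp i (List.range kN) (w.getD i 0), hw i hik]
      rfl
    have hv' : PySem.Int.mod (v + T) p = (S + wp xT yT kN p x i) % p := by
      rw [PySem.Int.mod_eq_emod_of_pos hp, hv, Int.add_emod, modmod, ← Int.add_emod,
        congAddR S hTmod]
    rw [ihl _ (S + wp xT yT kN p x i) hv' (fun j hj => hmem j (by simp [hj]))]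
    simp only [List.map_cons, List.sum_cons]
    congr 1; ring

theorem baryEval_eq (xT yT : List Int) (k p x : Int) (hp : 0 < p) :
    baryEval (baryWeights xT yT k p) xT x k p
      = (((List.range k.toNat).map (wp xT yT k.toNat p x)).sum) % p := by
  simp only [baryEval]
  rw [vfold xT yT (baryWeights xT yT k p) p x hp k.toNat
    (fun i hi => by rw [baryWeights_eq]; simp [hi])
    (List.range k.toNat) 0 0 (by simp) (by simp)]
  simp

-- ===== agreement counts and the outer loop =====

theorem countfold (q : Nat → Prop) [DecidablePred q] (l : List Nat) :
    ∀ (a : Int), l.foldl (fun a j => if q j then a + 1 else a) a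
      = a + (l.map (fun j => if q j then (1 : Int) else 0)).sum := by
  induction l with
  | nil => intro a; simp
  | cons j t ih =>
    intro a
    by_cases h : q j
    · rw [List.foldl_cons, if_pos h, ih]
      simp [h]; ring
    · rw [List.foldl_cons, if_neg h, ih]
      simp [h]

theorem agree_eq (y xs : List Int) (k p : Int) (hp : 0 < p) (T : List Nat) :
    ((List.range xs.length).map (fun i =>
      if (eval_poly_vector (interpolate_lagrange (T.map (fun i => xs.getD i 0))
            (T.map (fun i => y.getD i 0)) k p) xs p).getD i 0 = y.getD i 0
      then (1 : Int) else 0)).sum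
    = (List.range xs.length).foldl (fun agree j =>
        if baryEval (baryWeights (T.map (fun i => xs.getD i 0))
              (T.map (fun i => y.getD i 0)) k p)
            (T.map (fun i => xs.getD i 0)) (xs.getD j 0) k p = y.getD j 0
        then agree + 1 else agree) 0 := by
  rw [countfold _ (List.range xs.length) 0, zero_add]
  apply congrArg
  apply List.map_congr_left
  intro i hi
  have hin : i < xs.length := List.mem_range.mp hi
  have hcw : (eval_poly_vector (interpolate_lagrange (T.map (fun i => xs.getD i 0))
      (T.map (fun i => y.getD i 0)) k p) xs p).getD i 0
      = poly_eval (interpolate_lagrange (T.map (fun i => xs.getD i 0))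
          (T.map (fun i => y.getD i 0)) k p) (xs.getD i 0) p := by
    rw [List.getD_eq_getElem _ _ (by simpa [eval_poly_vector] using hin),
      List.getD_eq_getElem _ _ hin]
    simp [eval_poly_vector]
  rw [hcw, interp_eval _ _ k p _ hp, ← baryEval_eq _ _ k p _ hp]

theorem loop_eq (y xs : List Int) (k p : Int) (hp : 0 < p) :
    ∀ (Ts : List (List Nat)) (best : Int),
      baeLoopA y xs k p Ts best = baeLoopB y xs k p Ts best := by
  intro Ts
  induction Ts with
  | nil => intro best; rfl
  | cons T t ih =>
    intro best
    simp only [baeLoopA, baeLoopB]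
    rw [agree_eq y xs k p hp T]
    simp only [ih]

-- ===== VERDICT (by name: the statement is the Claim_ definition above) =====
theorem best_agreement_exact_spec : Claim_equal_best_agreement_exact := by
  intro y xs k p _ hpre
  obtain ⟨hk, himp⟩ := hpre
  unfold Spec_best_agreement_exact best_agreement_exact best_agreement_exact_alt
  by_cases hn : xs.length = 0
  · have hxs : xs = [] := List.length_eq_zero_iff.mp hn
    subst hxs
    cases hkz : k.toNat with
    | zero =>
      norm_num [baeLoopA, baeLoopB, PySem.List.combinations_zero]
    | succ m =>
      simp only [List.length_nil, List.range_zero, PySem.List.combinations_nil_succ]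
      rfl
  · by_cases hkn : k ≤ (xs.length : Int)
    · have hp1 : 1 ≤ p := (himp ⟨hkn, by omega⟩).2
      exact loop_eq y xs k p (by omega) _ _
    · have hlt : (List.range xs.length).length < k.toNat := by
        rw [List.length_range]; omega
      rw [PySem.List.combinations_eq_nil_of_length_lt (List.range xs.length) hlt]
      rfl
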